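-- pv_equiv track=rewrite | github.com/SmartData-Polito/logprecis | 2.Training/core/functions/tokenizer_functions.py | align_labels_with_statements
-- ===== SOURCE A (Python) =====
-- def align_labels_with_statements(
--     labels, tokens_ids, context_statements, special_token_id
-- ):
--     """Function that puts to -100 (CrossEntropy will ignore) all labels not associated to NON-CONTEXT statement tokens.
--     Basically, useful to only backpropagate the loss related to the STAs tokens.
--     Args:
--         labels (list): List of labels. Each token (also non-context ones) has 1 associated.
--         tokens_ids (list): Token ids from the tokenizer.
--         context_statements (list): List of ids corresponding to context statements. Incremental from 0.
--         special_token_id (int): Special token id assigned by the tokenizer to the STA token.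
--
--     Returns:
--         list: list of new labels (only related to NON-CONTEXT statement tokens)
--     """
--     new_labels = []
--     label_it = 0
--     for token_id in tokens_ids:
--         if token_id == special_token_id:
--             if label_it not in context_statements:
--                 # '[STA]' token not in context
--                 new_labels.append(labels[label_it])
--             else:
--                 # '[STA]' token in context
--                 new_labels.append(-100)
--             label_it += 1
--         else:
--             # Anything else
--             new_labels.append(-100)
--     return new_labels
-- ===== SOURCE B (Python) =====
-- def align_labels_with_statements(
--     labels, tokens_ids, context_statements, special_token_id
-- ):
--     special_positions = [
--         i for i, t in enumerate(tokens_ids) if t == special_token_id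
--     ]
--     result = [-100] * len(tokens_ids)
--     for j, pos in enumerate(special_positions):
--         if j not in context_statements:
--             result[pos] = labels[j]
--     return result
-- ===== Notes on version B (the rewrite author's own statement) =====
-- stated objective: alternative
-- what changed: Replaces the counter-threaded append loop with a two-pass scheme: first index the positions of special tokens, then fill a preallocated [-100]*n list by assigning labels at those positions keyed on the special-token ordinal.
import Mathlib
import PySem

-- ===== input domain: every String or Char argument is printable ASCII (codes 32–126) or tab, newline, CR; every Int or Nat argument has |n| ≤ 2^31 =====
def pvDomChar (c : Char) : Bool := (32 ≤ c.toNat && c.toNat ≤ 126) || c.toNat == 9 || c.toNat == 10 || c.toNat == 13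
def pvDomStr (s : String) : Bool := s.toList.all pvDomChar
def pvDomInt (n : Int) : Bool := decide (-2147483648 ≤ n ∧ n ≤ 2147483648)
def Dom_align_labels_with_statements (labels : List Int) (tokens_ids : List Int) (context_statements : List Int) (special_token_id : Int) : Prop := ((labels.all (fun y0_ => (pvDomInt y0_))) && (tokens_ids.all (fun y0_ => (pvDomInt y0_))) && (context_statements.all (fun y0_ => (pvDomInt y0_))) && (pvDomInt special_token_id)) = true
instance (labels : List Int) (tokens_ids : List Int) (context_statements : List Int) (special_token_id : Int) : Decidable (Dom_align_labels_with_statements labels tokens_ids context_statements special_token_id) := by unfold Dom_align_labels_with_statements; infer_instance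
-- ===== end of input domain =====

-- B restructures A's single counter-threaded scan into two passes: index the special-token
-- positions, then fill a preallocated [-100]*n list at those positions (objective: alternative).

-- ===== PORT A =====
-- A's loop: state = (new_labels, label_it); labels[label_it] ported via pyGet? (in range under Pre_).
def align_labels_with_statements (labels : List Int) (tokens_ids : List Int) (context_statements : List Int) (special_token_id : Int) : List Int :=
  (tokens_ids.foldl
    (fun (st : List Int × Int) token_id =>
      if token_id = special_token_id then
        if st.2 ∉ context_statements then
          (st.1 ++ [(PySem.List.pyGet? labels st.2).getD 0], st.2 + 1)
        else
          (st.1 ++ [(-100 : Int)], st.2 + 1)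
      else
        (st.1 ++ [(-100 : Int)], st.2))
    ([], 0)).1

-- ===== PORT B =====
-- result[pos] = v ported as List.set (exact: every pos from enumerate is a nonnegative in-range index).
def align_labels_with_statements_alt (labels : List Int) (tokens_ids : List Int) (context_statements : List Int) (special_token_id : Int) : List Int :=
  let special_positions :=
    (PySem.List.enumerate tokens_ids).filterMap
      (fun p => if p.2 = special_token_id then some p.1 else none)
  (PySem.List.enumerate special_positions).foldl
    (fun result jp =>
      if jp.1 ∉ context_statements then
        result.set jp.2.toNat ((PySem.List.pyGet? labels jp.1).getD 0)
      else result)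
    (List.replicate tokens_ids.length (-100))

-- ===== PRECONDITION & SPEC =====
-- Pre_ excludes exactly the inputs where Python A raises IndexError (labels[j] for a
-- non-context special-token ordinal j beyond labels); Python B raises there too.
def Pre_align_labels_with_statements (labels : List Int) (tokens_ids : List Int) (context_statements : List Int) (special_token_id : Int) : Prop :=
  ∀ k : Nat, k < tokens_ids.count special_token_id →
    ((k : Int) ∈ context_statements ∨ k < labels.length)
instance (labels : List Int) (tokens_ids : List Int) (context_statements : List Int) (special_token_id : Int) : Decidable (Pre_align_labels_with_statements labels tokens_ids context_statements special_token_id) := by unfold Pre_align_labels_with_statements; infer_instance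

def pvWitness_align_labels_with_statements : List Int × List Int × List Int × Int :=
  ([1, 2], [5, 0, 5], [0], 5)

def Spec_align_labels_with_statements (labels : List Int) (tokens_ids : List Int) (context_statements : List Int) (special_token_id : Int) (out : List Int) : Prop := out = align_labels_with_statements_alt labels tokens_ids context_statements special_token_id
instance (labels : List Int) (tokens_ids : List Int) (context_statements : List Int) (special_token_id : Int) (out : List Int) : Decidable (Spec_align_labels_with_statements labels tokens_ids context_statements special_token_id out) := by unfold Spec_align_labels_with_statements; infer_instance

-- ===== CLAIM (what is proved, stated in full; the proofs are below) =====
def Claim_equal_align_labels_with_statements : Prop := ∀ (labels : List Int) (tokens_ids : List Int) (context_statements : List Int) (special_token_id : Int), Dom_align_labels_with_statements labels tokens_ids context_statements special_token_id → Pre_align_labels_with_statements labels tokens_ids context_statements special_token_id → Spec_align_labels_with_statements labels tokens_ids context_statements special_token_id (align_labels_with_statements labels tokens_ids context_statements special_token_id)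

-- ===== LEMMAS AND PROOFS =====

-- the value both programs place at the j-th special token
def pvVal (labels context_statements : List Int) (j : Int) : Int :=
  if j ∈ context_statements then -100 else (PySem.List.pyGet? labels j).getD 0

-- reference description of the common output, recursing on tokens with ordinal j
def pvSpec (labels context_statements : List Int) (special_token_id : Int) : List Int → Int → List Int
  | [], _ => []
  | t :: ts, j =>
      (if t = special_token_id then pvVal labels context_statements j else -100) ::
        pvSpec labels context_statements special_token_id ts
          (if t = special_token_id then j + 1 else j)

theorem pvA_fold (labels cs : List Int) (sid : Int) :
    ∀ (toks : List Int) (acc : List Int) (j : Int),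
      (toks.foldl
        (fun (st : List Int × Int) token_id =>
          if token_id = sid then
            if st.2 ∉ cs then
              (st.1 ++ [(PySem.List.pyGet? labels st.2).getD 0], st.2 + 1)
            else
              (st.1 ++ [(-100 : Int)], st.2 + 1)
          else
            (st.1 ++ [(-100 : Int)], st.2))
        (acc, j)).1 = acc ++ pvSpec labels cs sid toks j := by
  intro toks
  induction toks with
  | nil => intro acc j; simp [pvSpec]
  | cons t ts ih =>
    intro acc j
    simp only [List.foldl_cons]
    by_cases ht : t = sid
    · by_cases hc : j ∈ cs
      · rw [if_pos ht, if_neg (by simpa using hc), ih]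
        simp [pvSpec, ht, pvVal, hc]
      · rw [if_pos ht, if_pos hc, ih]
        simp [pvSpec, ht, pvVal, hc]
    · rw [if_neg ht, ih]
      simp [pvSpec, ht]

-- shift PySem.List.enumerate's start by one
theorem pvEnumerate_shift {α : Type} (xs : List α) :
    ∀ s : Int, PySem.List.enumerate xs (s + 1)
      = (PySem.List.enumerate xs s).map (fun p => (p.1 + 1, p.2)) := by
  induction xs with
  | nil => intro s; simp [PySem.List.enumerate_nil]
  | cons x xs ih =>
    intro s
    rw [PySem.List.enumerate_cons, PySem.List.enumerate_cons, ih (s + 1)]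
    simp

-- B's special-position index, as a function of the token list
def pvSp (toks : List Int) (sid : Int) : List Int :=
  (PySem.List.enumerate toks).filterMap (fun p => if p.2 = sid then some p.1 else none)

theorem pvSp_cons (t : Int) (ts : List Int) (sid : Int) :
    pvSp (t :: ts) sid
      = (if t = sid then [(0 : Int)] else []) ++ (pvSp ts sid).map (· + 1) := by
  unfold pvSp
  rw [PySem.List.enumerate_cons, show (0 : Int) + 1 = 0 + 1 from rfl, pvEnumerate_shift]
  by_cases ht : t = sid <;>
    simp [ht, List.filterMap_map, List.map_filterMap, Function.comp, apply_ite]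

theorem pvSp_nonneg (toks : List Int) (sid : Int) :
    ∀ i ∈ pvSp toks sid, 0 ≤ i := by
  intro i hi
  unfold pvSp at hi
  obtain ⟨p, hp, hpi⟩ := List.mem_filterMap.mp hi
  obtain ⟨k, hk, rfl⟩ := (PySem.List.mem_enumerate_iff _ _ _).mp hp
  simp at hpi
  omega

-- B's filling loop
def pvApply (labels cs : List Int) (l : List (Int × Int)) (res : List Int) : List Int :=
  l.foldl
    (fun result jp =>
      if jp.1 ∉ cs then
        result.set jp.2.toNat ((PySem.List.pyGet? labels jp.1).getD 0)
      else result)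
    res

-- positions shifted by one only touch the tail
theorem pvApply_shift (labels cs : List Int) :
    ∀ (l : List Int) (s : Int) (h : Int) (res : List Int), (∀ i ∈ l, 0 ≤ i) →
      pvApply labels cs (PySem.List.enumerate (l.map (· + 1)) s) (h :: res)
        = h :: pvApply labels cs (PySem.List.enumerate l s) res := by
  intro l
  induction l with
  | nil => intro s h res _; simp [PySem.List.enumerate_nil, pvApply]
  | cons i l ih =>
    intro s h res hnn
    have hi : 0 ≤ i := hnn i (by simp)
    rw [List.map_cons, PySem.List.enumerate_cons, PySem.List.enumerate_cons]
    unfold pvApply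
    rw [List.foldl_cons, List.foldl_cons]
    have htn : (i + 1).toNat = i.toNat + 1 := by omega
    by_cases hc : s ∈ cs
    · simp only [hc, not_true_eq_false, if_false]
      exact ih (s + 1) h res (fun j hj => hnn j (by simp [hj]))
    · simp only [hc, not_false_eq_true, if_true, htn, List.set_cons_succ]
      exact ih (s + 1) h (res.set i.toNat ((PySem.List.pyGet? labels s).getD 0))
        (fun j hj => hnn j (by simp [hj]))

theorem pvB_fold (labels cs : List Int) (sid : Int) :
    ∀ (toks : List Int) (j : Int),
      pvApply labels cs (PySem.List.enumerate (pvSp toks sid) j)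
          (List.replicate toks.length (-100))
        = pvSpec labels cs sid toks j := by
  intro toks
  induction toks with
  | nil => intro j; simp [pvSp, PySem.List.enumerate_nil, pvApply, pvSpec]
  | cons t ts ih =>
    intro j
    rw [pvSp_cons, List.length_cons, List.replicate_succ]
    by_cases ht : t = sid
    · simp only [ht, if_true, List.singleton_append]
      rw [PySem.List.enumerate_cons]
      unfold pvApply
      rw [List.foldl_cons]
      by_cases hc : j ∈ cs
      · simp only [hc, not_true_eq_false, if_false]
        have hs := pvApply_shift labels cs (pvSp ts sid) (j + 1) (-100)
          (List.replicate ts.length (-100)) (pvSp_nonneg ts sid)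
        have ih' := ih (j + 1)
        unfold pvApply at hs ih'
        rw [hs, ih']
        simp [pvSpec, pvVal, hc]
      · simp only [hc, not_false_eq_true, if_true, Int.toNat_zero, List.set_cons_zero]
        have hs := pvApply_shift labels cs (pvSp ts sid) (j + 1)
          ((PySem.List.pyGet? labels j).getD 0)
          (List.replicate ts.length (-100)) (pvSp_nonneg ts sid)
        have ih' := ih (j + 1)
        unfold pvApply at hs ih'
        rw [hs, ih']
        simp [pvSpec, pvVal, hc]
    · simp only [ht, if_false, List.nil_append]
      have hs := pvApply_shift labels cs (pvSp ts sid) j (-100)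
        (List.replicate ts.length (-100)) (pvSp_nonneg ts sid)
      have ih' := ih j
      unfold pvApply at hs ih'
      unfold pvApply
      rw [hs, ih']
      simp [pvSpec, ht]

-- ===== VERDICT (by name: the statement is the Claim_ definition above) =====
theorem align_labels_with_statements_spec : Claim_equal_align_labels_with_statements := by
  intro labels toks cs sid _ _
  unfold Spec_align_labels_with_statements
  unfold align_labels_with_statements align_labels_with_statements_alt
  rw [pvA_fold labels cs sid toks [] 0]
  have hB := pvB_fold labels cs sid toks 0
  unfold pvApply at hB
  unfold pvSp at hB
  rw [hB]
  simp
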